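-- pv_equiv track=rewrite | github.com/purefunctor/simon | simon/utils.py | _compute_row_col
-- ===== SOURCE A (Python) =====
-- def _compute_row_col(text: str, position: int) -> tuple[int, int]:
--     row = 1
--     col = 1
--     current = 0
--     while current != position:
--         if text[current] == "\n":
--             row += 1
--             col = 0
--         col += 1
--         current += 1
--     return (row, col)
-- ===== SOURCE B (Python) =====
-- def _compute_row_col(text: str, position: int) -> tuple[int, int]:
--     if position < 0 or position > len(text):
--         raise IndexError("string index out of range")
--     prefix = text[:position]
--     return (1 + prefix.count("\n"), len(prefix) - prefix.rfind("\n"))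
-- ===== Notes on version B (the rewrite author's own statement) =====
-- stated objective: idiomatic
-- what changed: Replaces A's char-by-char while-loop carrying row/col state by two library scans of the validated prefix text[:position]: row = 1 + prefix.count('\n') and col = len(prefix) - prefix.rfind('\n').
import Mathlib
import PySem

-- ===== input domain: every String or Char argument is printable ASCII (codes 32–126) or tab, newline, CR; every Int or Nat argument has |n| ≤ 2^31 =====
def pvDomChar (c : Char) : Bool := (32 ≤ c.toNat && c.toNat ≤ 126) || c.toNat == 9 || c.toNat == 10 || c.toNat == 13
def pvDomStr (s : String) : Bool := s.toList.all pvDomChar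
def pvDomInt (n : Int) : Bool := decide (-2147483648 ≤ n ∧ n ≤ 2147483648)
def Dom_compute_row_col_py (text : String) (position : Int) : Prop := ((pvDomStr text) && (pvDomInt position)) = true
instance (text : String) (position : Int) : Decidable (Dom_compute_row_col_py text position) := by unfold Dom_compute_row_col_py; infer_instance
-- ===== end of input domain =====

-- B replaces A's char-by-char loop by two library scans of the prefix (count of newlines, and
-- rfind of the last newline); proved equal to A on 0 ≤ position ≤ len(text), where A returns.

-- ===== PORT A =====
-- A's while-loop: current steps from 0 towards position; fuel = position.toNat + 1 bounds the
-- iterations (the loop runs exactly position times on inputs Pre_ admits); pyGet? none = IndexError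
-- (excluded by Pre_, the loop state is returned only as a total-function default there).
def computeRowColLoop (cs : List Char) (position : Int) (row col current : Int) (fuel : Nat) :
    Int × Int :=
  match fuel with
  | 0 => (row, col)
  | Nat.succ f =>
    if current = position then (row, col)
    else
      match PySem.List.pyGet? cs current with
      | none => (row, col)
      | some c =>
        if c = '\n' then computeRowColLoop cs position (row + 1) (0 + 1) (current + 1) f
        else computeRowColLoop cs position row (col + 1) (current + 1) f

def compute_row_col_py (text : String) (position : Int) : Int × Int :=
  computeRowColLoop text.toList position 1 1 0 (position.toNat + 1)

-- ===== PORT B =====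
def compute_row_col_py_alt (text : String) (position : Int) : Int × Int :=
  -- 'raise IndexError' on an out-of-range offset: no value in Python; outside Pre_ the port
  -- returns the junk value (0, 0)
  if position < 0 ∨ PySem.Str.len text < position then (0, 0)
  else
    let pfx := PySem.Str.slice text none (some position)
    (1 + (PySem.Str.count pfx "\n" : Int), PySem.Str.len pfx - PySem.Str.rfind pfx "\n")

-- ===== PRECONDITION & SPEC =====
-- Pre_ excludes exactly the inputs (position < 0 or position > len(text)) on which A's loop
-- raises IndexError; A returns no value there.
def Pre_compute_row_col_py (text : String) (position : Int) : Prop :=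
  0 ≤ position ∧ position ≤ (text.toList.length : Int)
instance (text : String) (position : Int) : Decidable (Pre_compute_row_col_py text position) := by
  unfold Pre_compute_row_col_py; infer_instance

def pvWitness_compute_row_col_py : String × Int := ("ab\ncd", 4)

def Spec_compute_row_col_py (text : String) (position : Int) (out : Int × Int) : Prop :=
  out = compute_row_col_py_alt text position
instance (text : String) (position : Int) (out : Int × Int) :
    Decidable (Spec_compute_row_col_py text position out) := by
  unfold Spec_compute_row_col_py; infer_instance

-- ===== CLAIM (what is proved, stated in full; the proofs are below) =====
def Claim_equal_compute_row_col_py : Prop :=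
  ∀ (text : String) (position : Int), Dom_compute_row_col_py text position →
    Pre_compute_row_col_py text position →
    Spec_compute_row_col_py text position (compute_row_col_py text position)

-- ===== LEMMAS AND PROOFS =====

-- one loop iteration, as a fold step
def rcStep (rc : Int × Int) (c : Char) : Int × Int :=
  if c = '\n' then (rc.1 + 1, 0 + 1) else (rc.1, rc.2 + 1)

-- index of the last occurrence of '\n' (Python rfind value), defined from the head
def lastNl : List Char → Int
  | [] => -1
  | h :: t => if lastNl t ≠ -1 then 1 + lastNl t else if h = '\n' then 0 else -1

lemma neg_one_le_lastNl (p : List Char) : -1 ≤ lastNl p := by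
  induction p with
  | nil => simp [lastNl]
  | cons h t ih => simp only [lastNl]; split_ifs <;> omega

lemma lastNl_eq_neg_one_iff (p : List Char) : lastNl p = -1 ↔ '\n' ∉ p := by
  induction p with
  | nil => simp [lastNl]
  | cons h t ih =>
    simp only [lastNl, List.mem_cons]
    by_cases ht : lastNl t = -1
    · have hmem : '\n' ∉ t := ih.mp ht
      by_cases hh : h = '\n'
      · simp [ht, hh]
      · have : ¬ ('\n' = h) := fun hx => hh hx.symm
        simp [ht, hh, hmem, this]
    · have h1 := neg_one_le_lastNl t
      have hmem : '\n' ∈ t := by by_contra hn; exact ht (ih.mpr hn)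
      simp only [ht, if_pos, ne_eq, not_false_iff]
      constructor
      · intro hx; omega
      · intro hx; exact absurd (Or.inr hmem) hx

lemma lastNl_nonneg (p : List Char) (h : '\n' ∈ p) : 0 ≤ lastNl p := by
  have h1 := neg_one_le_lastNl p
  have h2 : lastNl p ≠ -1 := fun hx => (lastNl_eq_neg_one_iff p).mp hx h
  omega

lemma lastNl_append_singleton (p : List Char) (c : Char) :
    lastNl (p ++ [c]) = if c = '\n' then (p.length : Int) else lastNl p := by
  induction p with
  | nil => by_cases hc : c = '\n' <;> simp [lastNl, hc]
  | cons h t ih =>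
    by_cases hc : c = '\n'
    · simp only [hc, if_pos rfl] at ih ⊢
      have hmem : '\n' ∈ t ++ ['\n'] := by simp
      have := lastNl_nonneg (t ++ ['\n']) hmem
      simp only [List.cons_append, lastNl, ih, List.length_cons]
      have hne : (t.length : Int) ≠ -1 := by omega
      simp [hne]; push_cast; ring
    · simp only [if_neg hc] at ih ⊢
      simp [List.cons_append, lastNl, ih]

-- the fold over the scanned prefix, in closed form
lemma foldl_rcStep (p : List Char) (r c : Int) :
    p.foldl rcStep (r, c) =
      (r + (p.count '\n' : Int),
       if '\n' ∈ p then (p.length : Int) - lastNl p else c + p.length) := by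
  induction p generalizing r c with
  | nil => simp
  | cons h t ih =>
    by_cases hh : h = '\n'
    · subst hh
      simp only [List.foldl_cons, rcStep, if_pos rfl, ih, List.count_cons_self,
        List.mem_cons, true_or, if_pos, List.length_cons, lastNl]
      refine Prod.ext ?_ ?_
      · simp; push_cast; ring
      · simp only
        by_cases ht : '\n' ∈ t
        · have hne : lastNl t ≠ -1 := fun hx => absurd ((lastNl_eq_neg_one_iff t).mp hx) (fun hn => hn ht)
          simp [ht, hne]; push_cast; ring
        · have hz : lastNl t = -1 := (lastNl_eq_neg_one_iff t).mpr ht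
          simp [ht, hz]; push_cast; ring
    · simp only [List.foldl_cons, rcStep, if_neg hh, ih, List.count_cons, List.length_cons,
        List.mem_cons, lastNl]
      have hne : ¬ ('\n' = h) := fun hx => hh hx.symm
      refine Prod.ext ?_ ?_
      · simp [hne, hh]
      · simp only
        by_cases ht : '\n' ∈ t
        · have hnn : lastNl t ≠ -1 := fun hx => absurd ((lastNl_eq_neg_one_iff t).mp hx) (fun hn => hn ht)
          simp [ht, hne, hnn, hh]; push_cast; ring
        · simp [ht, hne, hh]; push_cast; ring

-- A's loop is the fold of rcStep over the first n characters
lemma computeRowColLoop_eq_foldl (n : Nat) :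
    ∀ (cs : List Char) (k : Nat) (row col : Int) (fuel : Nat),
      k + n ≤ cs.length → n ≤ fuel →
      computeRowColLoop cs ((k : Int) + n) row col k fuel
        = ((cs.drop k).take n).foldl rcStep (row, col) := by
  induction n with
  | zero =>
    intro cs k row col fuel _ _
    cases fuel with
    | zero => simp [computeRowColLoop]
    | succ f => simp [computeRowColLoop]
  | succ n ih =>
    intro cs k row col fuel hlen hf
    cases fuel with
    | zero => omega
    | succ f =>
      have hk : k < cs.length := by omega
      have hne : (k : Int) ≠ (k : Int) + (n + 1 : Nat) := by push_cast; omega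
      have hget : PySem.List.pyGet? cs (k : Int) = some cs[k] := by
        simp [PySem.List.pyGet?_natCast, List.getElem?_eq_getElem hk]
      have hdrop : cs.drop k = cs[k] :: cs.drop (k + 1) := List.drop_eq_getElem_cons hk
      have hidx : (k : Int) + ((n + 1 : Nat) : Int) = ((k + 1 : Nat) : Int) + (n : Int) := by
        push_cast; ring
      have hcur : (k : Int) + 1 = ((k + 1 : Nat) : Int) := by push_cast; ring
      simp only [computeRowColLoop, if_neg hne, hget]
      rw [hdrop, List.take_succ_cons, List.foldl_cons]
      by_cases hc : cs[k] = '\n'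
      · simp only [if_pos hc, hidx, hcur]
        rw [ih cs (k + 1) (row + 1) (0 + 1) f (by omega) (by omega)]
        simp [rcStep, hc]
      · simp only [if_neg hc, hidx, hcur]
        rw [ih cs (k + 1) row (col + 1) f (by omega) (by omega)]
        simp [rcStep, hc]

-- Python count of a single character is List.count
lemma count_go_single (c : Char) :
    ∀ (l : List Char) (fuel acc : Nat), l.length ≤ fuel →
      PySem.Chars.count.go [c] fuel l acc = acc + l.count c := by
  intro l
  induction l with
  | nil => intro fuel acc _; cases fuel <;> simp [PySem.Chars.count.go]
  | cons h t ih =>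
    intro fuel acc hf
    cases fuel with
    | zero => simp at hf
    | succ f =>
      have hgo : PySem.Chars.count.go [c] (f + 1) (h :: t) acc
          = if (c == h) then PySem.Chars.count.go [c] f t (acc + 1)
            else PySem.Chars.count.go [c] f t acc := by
        simp [PySem.Chars.count.go, List.isPrefixOf]
      have hlen : t.length ≤ f := by simpa using hf
      by_cases hc : c = h
      · rw [hgo, if_pos (by simp [hc]), ih f (acc + 1) hlen]
        simp [List.count_cons, hc]; omega
      · rw [hgo, if_neg (by simp [hc]), ih f acc hlen]
        have hcs : ¬ h = c := fun hx => hc hx.symm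
        simp [List.count_cons, hcs]

lemma chars_count_single (p : List Char) (c : Char) :
    PySem.Chars.count p [c] = p.count c := by
  simp [PySem.Chars.count, count_go_single c p p.length 0 le_rfl]

-- Python rfind of a single character is lastNl-style last index: go at k sees the take (k+1) prefix
lemma rfind_go_newline (s : List Char) :
    ∀ (k : Nat), k ≤ s.length →
      PySem.Chars.rfind.go s ['\n'] k = lastNl (s.take (k + 1)) := by
  intro k
  induction k with
  | zero =>
    intro hk
    rw [PySem.Chars.rfind.go.eq_def]
    cases s with
    | nil => simp [lastNl, List.isPrefixOf]
    | cons h t =>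
      by_cases hc : h = '\n'
      · simp [List.isPrefixOf, hc, lastNl]
      · have hcs : ¬ '\n' = h := fun hx => hc hx.symm
        simp [List.isPrefixOf, hcs, lastNl, hc]
  | succ j ih =>
    intro hk
    have hgo : PySem.Chars.rfind.go s ['\n'] (j + 1)
        = if ['\n'].isPrefixOf (s.drop (j + 1)) = true then ((j + 1 : Nat) : Int)
          else PySem.Chars.rfind.go s ['\n'] j := by
      rw [PySem.Chars.rfind.go.eq_def]
    have hpre : ∀ (l : List Char), ['\n'].isPrefixOf l = true ↔ l.head? = some '\n' := by
      intro l; cases l with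
      | nil => simp [List.isPrefixOf]
      | cons a b =>
        simp only [List.isPrefixOf, List.isPrefixOf_nil_left, Bool.and_true, List.head?_cons,
          Option.some.injEq, beq_iff_eq]
        exact eq_comm
    have hj : j + 1 < s.length ∨ j + 1 = s.length := by omega
    rcases hj with hlt | heq
    · have hd : (s.drop (j + 1)).head? = some s[j+1] := by
        rw [List.head?_drop]; exact List.getElem?_eq_getElem hlt
      have htake : s.take (j + 1 + 1) = s.take (j + 1) ++ [s[j+1]] := by
        rw [List.take_succ, List.getElem?_eq_getElem hlt]; rfl
      rw [hgo, htake, lastNl_append_singleton]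
      by_cases hc : s[j+1] = '\n'
      · have hp : ['\n'].isPrefixOf (s.drop (j + 1)) = true := (hpre _).mpr (by rw [hd, hc])
        rw [if_pos hp, if_pos hc]
        simp [List.length_take, Nat.min_eq_left (by omega : j + 1 ≤ s.length)]
      · have hp : ¬ (['\n'].isPrefixOf (s.drop (j + 1)) = true) := by
          rw [hpre _, hd]; simp [hc]
        rw [if_neg hp, if_neg hc]
        exact ih (by omega)
    · have hd : s.drop (j + 1) = [] := List.drop_eq_nil_of_le (by omega)
      have hnp : ¬ (['\n'].isPrefixOf (s.drop (j + 1)) = true) := by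
        rw [hd]; simp [List.isPrefixOf]
      rw [hgo, if_neg hnp, ih (by omega), List.take_of_length_le (by omega),
        List.take_of_length_le (by omega)]

lemma chars_rfind_newline (p : List Char) :
    PySem.Chars.rfind p ['\n'] = lastNl p := by
  rw [PySem.Chars.rfind, rfind_go_newline p p.length le_rfl,
    List.take_of_length_le (by omega)]

-- both ports in terms of the prefix p = text.toList.take position.toNat
lemma alt_closed (text : String) (position : Int) (h0 : 0 ≤ position)
    (hlen : position ≤ (text.toList.length : Int)) :
    compute_row_col_py_alt text position
      = (1 + ((text.toList.take position.toNat).count '\n' : Int),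
         ((text.toList.take position.toNat).length : Int)
           - lastNl (text.toList.take position.toNat)) := by
  unfold compute_row_col_py_alt
  have hg : ¬ (position < 0 ∨ PySem.Str.len text < position) := by
    simp only [PySem.Str.len_eq, PySem.Chars.len_eq]
    omega
  rw [if_neg hg]
  have hsl : (PySem.Str.slice text none (some position)).toList
      = text.toList.take position.toNat := by
    rw [PySem.Str.toList_slice, PySem.Chars.slice_eq_listSlice, PySem.List.slice_to _ h0]
  have hc : PySem.Str.count (PySem.Str.slice text none (some position)) "\n"
      = (text.toList.take position.toNat).count '\n' := by
    rw [PySem.Str.count_eq, hsl]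
    exact chars_count_single _ '\n'
  have hr : PySem.Str.rfind (PySem.Str.slice text none (some position)) "\n"
      = lastNl (text.toList.take position.toNat) := by
    rw [PySem.Str.rfind_eq, hsl]
    exact chars_rfind_newline _
  have hl : PySem.Str.len (PySem.Str.slice text none (some position))
      = ((text.toList.take position.toNat).length : Int) := by
    rw [PySem.Str.len_eq, hsl]
  simp only []
  rw [hc, hr, hl]

-- ===== VERDICT (by name: the statement is the Claim_ definition above) =====
theorem compute_row_col_py_spec : Claim_equal_compute_row_col_py := by
  intro text position _ hpre
  obtain ⟨h0, hlen⟩ := hpre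
  unfold Spec_compute_row_col_py compute_row_col_py
  have hA := computeRowColLoop_eq_foldl position.toNat text.toList 0 1 1 (position.toNat + 1)
    (by omega) (by omega)
  simp only [Nat.cast_zero, zero_add, List.drop_zero] at hA
  rw [(by omega : (position.toNat : Int) = position)] at hA
  rw [hA, foldl_rcStep, alt_closed text position h0 hlen]
  set p := text.toList.take position.toNat with hp
  by_cases hm : '\n' ∈ p
  · simp [hm]
  · have hz : lastNl p = -1 := (lastNl_eq_neg_one_iff p).mpr hm
    simp [hm, hz]; ring
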